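-- pv_equiv track=rewrite | github.com/PlayfulProcess/recursive.eco-schemas | scripts/build_up_from_slavery.py | find_chapter_boundaries
-- ===== SOURCE A (Python) =====
-- CHAPTERS = [
--     {"roman": "I", "slug": "ch01", "title": "A Slave Among Slaves",
--      "summary": "Washington's earliest memories — born a slave in Virginia, living in a one-room cabin, wearing a flax shirt, eating scraps. The arrival of freedom comes as both liberation and bewilderment. The family moves to West Virginia where young Booker works in salt furnaces and coal mines while desperately seeking education."},
--     {"roman": "II", "slug": "ch02", "title": "Boyhood Days",
--      "summary": "Washington's childhood pursuit of education — learning the alphabet from a spelling book, attending school while working, adopting the surname 'Washington.' His mother's quiet determination, his first experience with a surname and a birth date, and his resolve to reach Hampton Institute."},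
--     {"roman": "III", "slug": "ch03", "title": "The Struggle For An Education",
--      "summary": "The journey to Hampton Normal and Agricultural Institute — traveling five hundred miles with almost no money, sleeping under a sidewalk in Richmond, and arriving at Hampton penniless. His admission test: sweeping a room. Under General Armstrong's influence, Washington discovers the dignity of labor and the transforming power of practical education."},
--     {"roman": "IV", "slug": "ch04", "title": "Helping Others",
--      "summary": "After Hampton, Washington returns home to teach, then attends Wayland Seminary in Washington, D.C. He contrasts the practical education of Hampton with the impractical pretensions he finds in the capital. He returns to Hampton to lead the night school and teach Native American students."},
--     {"roman": "V", "slug": "ch05", "title": "The Reconstruction Period",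
--      "summary": "Washington's assessment of Reconstruction — its mistakes and its lessons. He argues that the sudden bestowal of political power without economic preparation led to failure. A chapter that reveals both Washington's conservatism and his pragmatism."},
--     {"roman": "VI", "slug": "ch06", "title": "Black Race And Red Race",
--      "summary": "Washington's work with Native American students at Hampton — the parallels and differences between the two oppressed groups. He describes the challenges of educating students from the reservations and the mutual lessons learned."},
--     {"roman": "VII", "slug": "ch07", "title": "Early Days At Tuskegee",
--      "summary": "The founding of Tuskegee Normal and Industrial Institute in Alabama, 1881. Washington arrives to find no land, no building, no equipment — only the authorization from the state legislature. He begins teaching in a shanty and a church, with thirty students and boundless determination."},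
--     {"roman": "VIII", "slug": "ch08", "title": "Teaching School In A Stable And A Hen-House",
--      "summary": "The early struggles of Tuskegee — acquiring land, building structures with student labor, improvising everything. Washington describes the transformation of students who learn to build the very school they attend, making bricks, farming, and constructing buildings."},
--     {"roman": "IX", "slug": "ch09", "title": "Anxious Days And Sleepless Nights",
--      "summary": "The financial struggles of Tuskegee — debts, mortgages, and the constant need for funds. Washington describes the anxiety of building an institution with almost no resources and the generosity of both Northern philanthropists and poor Black families."},
--     {"roman": "X", "slug": "ch10", "title": "A Harder Task Than Making Bricks Without Straw",
--      "summary": "Building the brickmaking industry at Tuskegee — three failed kilns before success. Washington uses brickmaking as a parable for the larger enterprise: learning through failure, the dignity of manual labor, and the creation of real economic value."},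
--     {"roman": "XI", "slug": "ch11", "title": "Making Their Beds Before They Could Lie On Them",
--      "summary": "The expansion of Tuskegee's industrial education program — teaching students to produce what they consume, from mattresses to buildings. Washington's philosophy that education must connect mind and hand, theory and practice."},
--     {"roman": "XII", "slug": "ch12", "title": "Raising Money",
--      "summary": "Washington's fundraising methods and philosophy — meeting donors, giving speeches, writing appeals. He describes encounters with major philanthropists and the principle that one should earn support through demonstrated results rather than appeals to sympathy."},
--     {"roman": "XIII", "slug": "ch13", "title": "Two Thousand Miles For A Five-Minute Speech",
--      "summary": "The invitation to speak at the Atlanta Cotton States and International Exposition in 1895 — the opportunity that would make Washington the most prominent Black leader in America. He describes the journey, the anxiety, and the preparation."},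
--     {"roman": "XIV", "slug": "ch14", "title": "The Atlanta Exposition Address",
--      "summary": "The most famous chapter — Washington's account of his Atlanta Compromise speech, with the full text included. 'Cast down your bucket where you are.' The speech that proposed economic cooperation between the races at the cost of social equality. Washington describes the response: acclaim from whites, acceptance from many Blacks, controversy from others."},
--     {"roman": "XV", "slug": "ch15", "title": "The Secret Of Success In Public Speaking",
--      "summary": "Washington's philosophy and technique of public speaking — sincerity over polish, substance over style. He describes his methods, his famous addresses, and his belief that a speaker must have something genuine to say."},
--     {"roman": "XVI", "slug": "ch16", "title": "Europe",
--      "summary": "Washington's trip to Europe — audiences with Queen Victoria, meetings with prominent Europeans, and observations on class and race across the Atlantic. He compares the status of Black Americans with European working classes."},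
--     {"roman": "XVII", "slug": "ch17", "title": "Last Words",
--      "summary": "Washington's concluding chapter — reflections on race relations, the future of Tuskegee, and the philosophy of self-help and uplift that has guided his life. He calls for patience, hard work, and economic self-sufficiency as the path to racial progress."},
-- ]
--
-- def find_chapter_boundaries(text):
--     """Find the start line of each chapter, plus Preface and Introduction."""
--     lines = text.split('\n')
--     boundaries = []
--
--     # Find Preface
--     for i, line in enumerate(lines):
--         if line.strip() == "Preface":
--             boundaries.append((i, "preface", None))
--             break
--
--     # Find Introduction
--     for i, line in enumerate(lines):
--         if line.strip() == "Introduction":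
--             # Make sure it's the actual Introduction, not a TOC entry
--             if i > 80:
--                 boundaries.append((i, "introduction", None))
--                 break
--
--     # Find chapters: "Chapter I." followed by title on next line
--     for ch in CHAPTERS:
--         pattern = f"Chapter {ch['roman']}."
--         for i, line in enumerate(lines):
--             if line.strip() == pattern:
--                 # Verify next non-blank line matches title
--                 for j in range(i+1, min(i+5, len(lines))):
--                     if lines[j].strip():
--                         if ch["title"].split()[0] in lines[j].strip():
--                             boundaries.append((i, ch["slug"], ch))
--                         break
--                 break
--
--     boundaries.sort(key=lambda x: x[0])
--     return boundaries, lines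
-- ===== SOURCE B (Python) =====
-- CHAPTERS = [
--     {"roman": "I", "slug": "ch01", "title": "A Slave Among Slaves",
--      "summary": "Washington's earliest memories — born a slave in Virginia, living in a one-room cabin, wearing a flax shirt, eating scraps. The arrival of freedom comes as both liberation and bewilderment. The family moves to West Virginia where young Booker works in salt furnaces and coal mines while desperately seeking education."},
--     {"roman": "II", "slug": "ch02", "title": "Boyhood Days",
--      "summary": "Washington's childhood pursuit of education — learning the alphabet from a spelling book, attending school while working, adopting the surname 'Washington.' His mother's quiet determination, his first experience with a surname and a birth date, and his resolve to reach Hampton Institute."},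
--     {"roman": "III", "slug": "ch03", "title": "The Struggle For An Education",
--      "summary": "The journey to Hampton Normal and Agricultural Institute — traveling five hundred miles with almost no money, sleeping under a sidewalk in Richmond, and arriving at Hampton penniless. His admission test: sweeping a room. Under General Armstrong's influence, Washington discovers the dignity of labor and the transforming power of practical education."},
--     {"roman": "IV", "slug": "ch04", "title": "Helping Others",
--      "summary": "After Hampton, Washington returns home to teach, then attends Wayland Seminary in Washington, D.C. He contrasts the practical education of Hampton with the impractical pretensions he finds in the capital. He returns to Hampton to lead the night school and teach Native American students."},
--     {"roman": "V", "slug": "ch05", "title": "The Reconstruction Period",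
--      "summary": "Washington's assessment of Reconstruction — its mistakes and its lessons. He argues that the sudden bestowal of political power without economic preparation led to failure. A chapter that reveals both Washington's conservatism and his pragmatism."},
--     {"roman": "VI", "slug": "ch06", "title": "Black Race And Red Race",
--      "summary": "Washington's work with Native American students at Hampton — the parallels and differences between the two oppressed groups. He describes the challenges of educating students from the reservations and the mutual lessons learned."},
--     {"roman": "VII", "slug": "ch07", "title": "Early Days At Tuskegee",
--      "summary": "The founding of Tuskegee Normal and Industrial Institute in Alabama, 1881. Washington arrives to find no land, no building, no equipment — only the authorization from the state legislature. He begins teaching in a shanty and a church, with thirty students and boundless determination."},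
--     {"roman": "VIII", "slug": "ch08", "title": "Teaching School In A Stable And A Hen-House",
--      "summary": "The early struggles of Tuskegee — acquiring land, building structures with student labor, improvising everything. Washington describes the transformation of students who learn to build the very school they attend, making bricks, farming, and constructing buildings."},
--     {"roman": "IX", "slug": "ch09", "title": "Anxious Days And Sleepless Nights",
--      "summary": "The financial struggles of Tuskegee — debts, mortgages, and the constant need for funds. Washington describes the anxiety of building an institution with almost no resources and the generosity of both Northern philanthropists and poor Black families."},
--     {"roman": "X", "slug": "ch10", "title": "A Harder Task Than Making Bricks Without Straw",
--      "summary": "Building the brickmaking industry at Tuskegee — three failed kilns before success. Washington uses brickmaking as a parable for the larger enterprise: learning through failure, the dignity of manual labor, and the creation of real economic value."},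
--     {"roman": "XI", "slug": "ch11", "title": "Making Their Beds Before They Could Lie On Them",
--      "summary": "The expansion of Tuskegee's industrial education program — teaching students to produce what they consume, from mattresses to buildings. Washington's philosophy that education must connect mind and hand, theory and practice."},
--     {"roman": "XII", "slug": "ch12", "title": "Raising Money",
--      "summary": "Washington's fundraising methods and philosophy — meeting donors, giving speeches, writing appeals. He describes encounters with major philanthropists and the principle that one should earn support through demonstrated results rather than appeals to sympathy."},
--     {"roman": "XIII", "slug": "ch13", "title": "Two Thousand Miles For A Five-Minute Speech",
--      "summary": "The invitation to speak at the Atlanta Cotton States and International Exposition in 1895 — the opportunity that would make Washington the most prominent Black leader in America. He describes the journey, the anxiety, and the preparation."},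
--     {"roman": "XIV", "slug": "ch14", "title": "The Atlanta Exposition Address",
--      "summary": "The most famous chapter — Washington's account of his Atlanta Compromise speech, with the full text included. 'Cast down your bucket where you are.' The speech that proposed economic cooperation between the races at the cost of social equality. Washington describes the response: acclaim from whites, acceptance from many Blacks, controversy from others."},
--     {"roman": "XV", "slug": "ch15", "title": "The Secret Of Success In Public Speaking",
--      "summary": "Washington's philosophy and technique of public speaking — sincerity over polish, substance over style. He describes his methods, his famous addresses, and his belief that a speaker must have something genuine to say."},
--     {"roman": "XVI", "slug": "ch16", "title": "Europe",
--      "summary": "Washington's trip to Europe — audiences with Queen Victoria, meetings with prominent Europeans, and observations on class and race across the Atlantic. He compares the status of Black Americans with European working classes."},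
--     {"roman": "XVII", "slug": "ch17", "title": "Last Words",
--      "summary": "Washington's concluding chapter — reflections on race relations, the future of Tuskegee, and the philosophy of self-help and uplift that has guided his life. He calls for patience, hard work, and economic self-sufficiency as the path to racial progress."},
-- ]
--
--
-- def find_chapter_boundaries(text):
--     """Single pass: index the first qualifying occurrence of each heading, then assemble."""
--     lines = text.split('\n')
--     patterns = {f"Chapter {ch['roman']}.": ch for ch in CHAPTERS}
--
--     # One pass over the lines: first qualifying line index per heading string.
--     index = {}
--     for i, line in enumerate(lines):
--         s = line.strip()
--         if s not in index and (s == "Preface" or (s == "Introduction" and i > 80)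
--                                or s in patterns):
--             index[s] = i
--
--     boundaries = []
--     if "Preface" in index:
--         boundaries.append((index["Preface"], "preface", None))
--     if "Introduction" in index:
--         boundaries.append((index["Introduction"], "introduction", None))
--     for ch in CHAPTERS:
--         pattern = f"Chapter {ch['roman']}."
--         if pattern in index:
--             i = index[pattern]
--             # verify: first non-blank line shortly after the heading carries the title
--             first_non_blank = next((l.strip() for l in lines[i+1:i+5] if l.strip()), None)
--             if first_non_blank is not None and ch["title"].split()[0] in first_non_blank:
--                 boundaries.append((i, ch["slug"], ch))
--
--     boundaries.sort(key=lambda x: x[0])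
--     return boundaries, lines
-- ===== Notes on version B (the rewrite author's own statement) =====
-- stated objective: alternative
-- what changed: A scans the whole line list 19 times (one scan for Preface, one for Introduction, one per chapter, each restarting from line 0); B makes a single pass that records in a dict the first qualifying line index of each heading string and then assembles the boundaries from that index.
import Mathlib
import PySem

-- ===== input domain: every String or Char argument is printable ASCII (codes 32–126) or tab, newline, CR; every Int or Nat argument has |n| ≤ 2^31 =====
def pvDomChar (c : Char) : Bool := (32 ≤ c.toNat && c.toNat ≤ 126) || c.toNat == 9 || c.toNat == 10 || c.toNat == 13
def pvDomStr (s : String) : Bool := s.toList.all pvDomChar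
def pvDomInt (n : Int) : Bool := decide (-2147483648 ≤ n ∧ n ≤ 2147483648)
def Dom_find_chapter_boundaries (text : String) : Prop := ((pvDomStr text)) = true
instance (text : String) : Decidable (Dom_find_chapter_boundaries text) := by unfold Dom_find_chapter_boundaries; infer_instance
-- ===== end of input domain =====

-- B replaces A's 19 separate scans over the lines by ONE pass that indexes the first qualifying
-- occurrence of each heading string, then assembles the boundaries from that index (objective: alternative decomposition).

abbrev PVEntry := Int × String × (Option (List (String × String)))

def CHAPTERS : List (List (String × String)) := [
  [("roman", "I"), ("slug", "ch01"), ("title", "A Slave Among Slaves"), ("summary", "Washington's earliest memories — born a slave in Virginia, living in a one-room cabin, wearing a flax shirt, eating scraps. The arrival of freedom comes as both liberation and bewilderment. The family moves to West Virginia where young Booker works in salt furnaces and coal mines while desperately seeking education.")],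
  [("roman", "II"), ("slug", "ch02"), ("title", "Boyhood Days"), ("summary", "Washington's childhood pursuit of education — learning the alphabet from a spelling book, attending school while working, adopting the surname 'Washington.' His mother's quiet determination, his first experience with a surname and a birth date, and his resolve to reach Hampton Institute.")],
  [("roman", "III"), ("slug", "ch03"), ("title", "The Struggle For An Education"), ("summary", "The journey to Hampton Normal and Agricultural Institute — traveling five hundred miles with almost no money, sleeping under a sidewalk in Richmond, and arriving at Hampton penniless. His admission test: sweeping a room. Under General Armstrong's influence, Washington discovers the dignity of labor and the transforming power of practical education.")],
  [("roman", "IV"), ("slug", "ch04"), ("title", "Helping Others"), ("summary", "After Hampton, Washington returns home to teach, then attends Wayland Seminary in Washington, D.C. He contrasts the practical education of Hampton with the impractical pretensions he finds in the capital. He returns to Hampton to lead the night school and teach Native American students.")],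
  [("roman", "V"), ("slug", "ch05"), ("title", "The Reconstruction Period"), ("summary", "Washington's assessment of Reconstruction — its mistakes and its lessons. He argues that the sudden bestowal of political power without economic preparation led to failure. A chapter that reveals both Washington's conservatism and his pragmatism.")],
  [("roman", "VI"), ("slug", "ch06"), ("title", "Black Race And Red Race"), ("summary", "Washington's work with Native American students at Hampton — the parallels and differences between the two oppressed groups. He describes the challenges of educating students from the reservations and the mutual lessons learned.")],
  [("roman", "VII"), ("slug", "ch07"), ("title", "Early Days At Tuskegee"), ("summary", "The founding of Tuskegee Normal and Industrial Institute in Alabama, 1881. Washington arrives to find no land, no building, no equipment — only the authorization from the state legislature. He begins teaching in a shanty and a church, with thirty students and boundless determination.")],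
  [("roman", "VIII"), ("slug", "ch08"), ("title", "Teaching School In A Stable And A Hen-House"), ("summary", "The early struggles of Tuskegee — acquiring land, building structures with student labor, improvising everything. Washington describes the transformation of students who learn to build the very school they attend, making bricks, farming, and constructing buildings.")],
  [("roman", "IX"), ("slug", "ch09"), ("title", "Anxious Days And Sleepless Nights"), ("summary", "The financial struggles of Tuskegee — debts, mortgages, and the constant need for funds. Washington describes the anxiety of building an institution with almost no resources and the generosity of both Northern philanthropists and poor Black families.")],
  [("roman", "X"), ("slug", "ch10"), ("title", "A Harder Task Than Making Bricks Without Straw"), ("summary", "Building the brickmaking industry at Tuskegee — three failed kilns before success. Washington uses brickmaking as a parable for the larger enterprise: learning through failure, the dignity of manual labor, and the creation of real economic value.")],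
  [("roman", "XI"), ("slug", "ch11"), ("title", "Making Their Beds Before They Could Lie On Them"), ("summary", "The expansion of Tuskegee's industrial education program — teaching students to produce what they consume, from mattresses to buildings. Washington's philosophy that education must connect mind and hand, theory and practice.")],
  [("roman", "XII"), ("slug", "ch12"), ("title", "Raising Money"), ("summary", "Washington's fundraising methods and philosophy — meeting donors, giving speeches, writing appeals. He describes encounters with major philanthropists and the principle that one should earn support through demonstrated results rather than appeals to sympathy.")],
  [("roman", "XIII"), ("slug", "ch13"), ("title", "Two Thousand Miles For A Five-Minute Speech"), ("summary", "The invitation to speak at the Atlanta Cotton States and International Exposition in 1895 — the opportunity that would make Washington the most prominent Black leader in America. He describes the journey, the anxiety, and the preparation.")],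
  [("roman", "XIV"), ("slug", "ch14"), ("title", "The Atlanta Exposition Address"), ("summary", "The most famous chapter — Washington's account of his Atlanta Compromise speech, with the full text included. 'Cast down your bucket where you are.' The speech that proposed economic cooperation between the races at the cost of social equality. Washington describes the response: acclaim from whites, acceptance from many Blacks, controversy from others.")],
  [("roman", "XV"), ("slug", "ch15"), ("title", "The Secret Of Success In Public Speaking"), ("summary", "Washington's philosophy and technique of public speaking — sincerity over polish, substance over style. He describes his methods, his famous addresses, and his belief that a speaker must have something genuine to say.")],
  [("roman", "XVI"), ("slug", "ch16"), ("title", "Europe"), ("summary", "Washington's trip to Europe — audiences with Queen Victoria, meetings with prominent Europeans, and observations on class and race across the Atlantic. He compares the status of Black Americans with European working classes.")],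
  [("roman", "XVII"), ("slug", "ch17"), ("title", "Last Words"), ("summary", "Washington's concluding chapter — reflections on race relations, the future of Tuskegee, and the philosophy of self-help and uplift that has guided his life. He calls for patience, hard work, and economic self-sufficiency as the path to racial progress.")]
]

-- text.split('\n'): split? is none only for an empty separator, never for "\n" — exact here
def splitLines (text : String) : List String := (PySem.Str.split? text "\n").getD []

-- ch[k] on the constant chapter dicts above; every key used is present, so the "" default is never reached — exact here
def dget (ch : List (String × String)) (k : String) : String := (PySem.Dict.mk ch).getD k ""

-- f"Chapter {ch['roman']}."
def pvPat (ch : List (String × String)) : String := "Chapter " ++ dget ch "roman" ++ "."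

-- ch["title"].split()[0]: every chapter title above is a nonempty word list, so the "" default is never reached — exact here
def firstWord (ch : List (String × String)) : String := PySem.List.pyGetD (PySem.Str.split₀ (dget ch "title")) 0 ""

-- ===== PORT A =====

-- 'for i, line in enumerate(lines): if line.strip() == "Preface": append; break'
def prefLoop : List (Int × String) → List PVEntry
  | [] => []
  | (i, line) :: rest =>
    if PySem.Str.strip line = "Preface" then [(i, "preface", none)] else prefLoop rest

-- the Introduction scan: break (and append) only when i > 80
def introLoop : List (Int × String) → List PVEntry
  | [] => []
  | (i, line) :: rest =>
    if PySem.Str.strip line = "Introduction" then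
      (if 80 < i then [(i, "introduction", none)] else introLoop rest)
    else introLoop rest

-- 'for j in range(i+1, min(i+5, len(lines))): if lines[j].strip(): …; break'
-- (every j passed in lies in range, so the "" default of pyGetD is never reached — exact here)
def titleLoop (fw : String) (e : PVEntry) (lines : List String) : List Int → List PVEntry
  | [] => []
  | j :: rest =>
    if PySem.Str.strip (PySem.List.pyGetD lines j "") ≠ "" then
      (if PySem.Str.isIn fw (PySem.Str.strip (PySem.List.pyGetD lines j "")) then [e] else [])
    else titleLoop fw e lines rest

-- 'for i, line in enumerate(lines): if line.strip() == pattern: <title check>; break'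
def chLoop (ch : List (String × String)) (lines : List String) : List (Int × String) → List PVEntry
  | [] => []
  | (i, line) :: rest =>
    if PySem.Str.strip line = pvPat ch then
      titleLoop (firstWord ch) (i, dget ch "slug", some ch) lines
        (PySem.List.pyRange (i + 1) (min (i + 5) (lines.length : Int)))
    else chLoop ch lines rest

def find_chapter_boundaries (text : String) : (List (Int × String × (Option (List (String × String))))) × List String :=
  let lines := splitLines text
  let el := PySem.List.enumerate lines
  let boundaries :=
    CHAPTERS.foldl (fun acc ch => acc ++ chLoop ch lines el) (prefLoop el ++ introLoop el)
  (PySem.List.sorted boundaries (fun x => x.1), lines)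

-- ===== PORT B =====

-- 'if key in index: … index[key] …' — the value at a key, if present
def onIdx (o : Option Int) (f : Int → List PVEntry) : List PVEntry :=
  match o with
  | some i => f i
  | none => []

-- {f"Chapter {ch['roman']}.": ch for ch in CHAPTERS}
def patternsB : PySem.Dict String (List (String × String)) :=
  CHAPTERS.foldl (fun d ch => d.insert (pvPat ch) ch) PySem.Dict.empty

-- the qualification test of the single pass
def qual (i : Int) (s : String) : Bool :=
  s == "Preface" || (s == "Introduction" && decide (80 < i)) || patternsB.contains s

-- body of the one pass: record the first qualifying line index of each heading string
def idxStep (d : PySem.Dict String Int) (p : Int × String) : PySem.Dict String Int :=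
  if !d.contains (PySem.Str.strip p.2) && qual p.1 (PySem.Str.strip p.2) then
    d.insert (PySem.Str.strip p.2) p.1
  else d

-- 'next((l.strip() for l in lines[i+1:i+5] if l.strip()), None)' then the membership test
def chCheck (ch : List (String × String)) (lines : List String) (i : Int) : List PVEntry :=
  let window := PySem.List.slice lines (some (i + 1)) (some (i + 5))
  match (window.filterMap (fun l => if PySem.Str.strip l ≠ "" then some (PySem.Str.strip l) else none)).head? with
  | some s => if PySem.Str.isIn (firstWord ch) s then [(i, dget ch "slug", some ch)] else []
  | none => []

def find_chapter_boundaries_alt (text : String) : (List (Int × String × (Option (List (String × String))))) × List String :=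
  let lines := splitLines text
  let index := (PySem.List.enumerate lines).foldl idxStep PySem.Dict.empty
  let b0 : List PVEntry := onIdx (index.get? "Preface") (fun i => [(i, "preface", none)])
  let b1 := b0 ++ onIdx (index.get? "Introduction") (fun i => [(i, "introduction", none)])
  let boundaries :=
    CHAPTERS.foldl (fun acc ch =>
      acc ++ onIdx (index.get? (pvPat ch)) (fun i => chCheck ch lines i)) b1
  (PySem.List.sorted boundaries (fun x => x.1), lines)

-- ===== PRECONDITION & SPEC =====
def Spec_find_chapter_boundaries (text : String) (out : (List (Int × String × (Option (List (String × String))))) × List String) : Prop := out = find_chapter_boundaries_alt text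
instance (text : String) (out : (List (Int × String × (Option (List (String × String))))) × List String) : Decidable (Spec_find_chapter_boundaries text out) := by
  unfold Spec_find_chapter_boundaries
  exact @instDecidableEqProd _ _ (fun a b => List.hasDecEq a b) (fun a b => List.hasDecEq a b) _ _

-- ===== CLAIM (what is proved, stated in full; the proofs are below) =====
def Claim_equal_find_chapter_boundaries : Prop := ∀ (text : String), Dom_find_chapter_boundaries text → Spec_find_chapter_boundaries text (find_chapter_boundaries text)

-- ===== LEMMAS AND PROOFS =====

-- the first index i in the enumerated lines whose stripped line equals k and satisfies q
def firstQ (k : String) (q : Int → Bool) : List (Int × String) → Option Int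
  | [] => none
  | (i, l) :: rest => if PySem.Str.strip l = k ∧ q i then some i else firstQ k q rest

theorem prefLoop_eq (el : List (Int × String)) :
    prefLoop el = onIdx (firstQ "Preface" (fun _ => true) el)
                    (fun i => [(i, "preface", none)]) := by
  induction el with
  | nil => rfl
  | cons p rest ih =>
    obtain ⟨i, l⟩ := p
    by_cases h : PySem.Str.strip l = "Preface" <;> simp [prefLoop, firstQ, onIdx, h, ih]

theorem introLoop_eq (el : List (Int × String)) :
    introLoop el = onIdx (firstQ "Introduction" (fun i => decide (80 < i)) el)
                     (fun i => [(i, "introduction", none)]) := by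
  induction el with
  | nil => rfl
  | cons p rest ih =>
    obtain ⟨i, l⟩ := p
    by_cases h : PySem.Str.strip l = "Introduction" <;>
      by_cases h80 : (80 : Int) < i <;>
        simp [introLoop, firstQ, onIdx, h, h80, ih]

theorem chLoop_eq (ch : List (String × String)) (lines : List String) (el : List (Int × String)) :
    chLoop ch lines el =
      onIdx (firstQ (pvPat ch) (fun _ => true) el)
        (fun i => titleLoop (firstWord ch) (i, dget ch "slug", some ch) lines
                    (PySem.List.pyRange (i + 1) (min (i + 5) (lines.length : Int)))) := by
  induction el with
  | nil => rfl
  | cons p rest ih =>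
    obtain ⟨i, l⟩ := p
    by_cases h : PySem.Str.strip l = pvPat ch <;> simp [chLoop, firstQ, onIdx, h, ih]

-- the one-pass fold never touches a key it already holds
theorem idxFold_get?_of_contains (el : List (Int × String)) :
    ∀ (d : PySem.Dict String Int) (k : String), d.contains k = true →
      (el.foldl idxStep d).get? k = d.get? k := by
  induction el with
  | nil => intro d k _; rfl
  | cons p rest ih =>
    intro d k hk
    simp only [List.foldl_cons]
    by_cases hc : (!d.contains (PySem.Str.strip p.2) && qual p.1 (PySem.Str.strip p.2)) = true
    · have hstep : idxStep d p = d.insert (PySem.Str.strip p.2) p.1 := by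
        simp only [idxStep]; rw [if_pos hc]
      have hc' := hc
      simp only [Bool.and_eq_true, Bool.not_eq_true'] at hc'
      have hs : d.contains (PySem.Str.strip p.2) = false := hc'.1
      have hne : k ≠ PySem.Str.strip p.2 := by
        intro h; rw [h] at hk; rw [hk] at hs; simp at hs
      rw [hstep, ih _ k (by rw [PySem.Dict.contains_insert]; simp [hk]),
          PySem.Dict.get?_insert_of_ne _ _ hne]
    · have hstep : idxStep d p = d := by
        simp only [idxStep]; rw [if_neg hc]
      rw [hstep]
      exact ih d k hk

-- the one-pass fold records, for key k, exactly the first qualifying occurrence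
theorem idxFold_get? (el : List (Int × String)) :
    ∀ (d : PySem.Dict String Int) (k : String), d.contains k = false →
      (el.foldl idxStep d).get? k = firstQ k (fun i => qual i k) el := by
  induction el with
  | nil =>
    intro d k hk
    simpa [firstQ] using (PySem.Dict.get?_eq_none_iff_contains d k).mpr hk
  | cons p rest ih =>
    intro d k hk
    obtain ⟨i, l⟩ := p
    simp only [List.foldl_cons]
    by_cases hs : PySem.Str.strip (i, l).2 = k
    · by_cases hq : qual i k = true
      · have hstep : idxStep d (i, l) = d.insert k i := by
          simp only [idxStep]
          rw [if_pos (by simp only [hs]; simp [hk, hq])]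
          rw [hs]
        rw [hstep, idxFold_get?_of_contains rest _ k (PySem.Dict.contains_insert_self d k i),
            PySem.Dict.get?_insert_self]
        simp [firstQ, hs, hq]
      · have hq' : qual i k = false := Bool.eq_false_iff.mpr hq
        have hstep : idxStep d (i, l) = d := by
          simp only [idxStep]
          rw [if_neg (by simp only [hs]; simp [hq'])]
        rw [hstep, ih d k hk]
        simp [firstQ, hs, hq']
    · have hfq : firstQ k (fun i => qual i k) ((i, l) :: rest)
          = firstQ k (fun i => qual i k) rest := by
        simp only [firstQ]
        rw [if_neg (by rintro ⟨h1, _⟩; exact hs h1)]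
      rw [hfq]
      by_cases hc : (!d.contains (PySem.Str.strip (i, l).2) && qual i (PySem.Str.strip (i, l).2)) = true
      · have hstep : idxStep d (i, l) = d.insert (PySem.Str.strip (i, l).2) i := by
          simp only [idxStep]; rw [if_pos hc]
        rw [hstep]
        refine ih _ k ?_
        rw [PySem.Dict.contains_insert]
        simp only [hk, Bool.or_false]
        exact beq_eq_false_iff_ne.mpr (fun h => hs h.symm)
      · have hstep : idxStep d (i, l) = d := by
          simp only [idxStep]; rw [if_neg hc]
        rw [hstep]
        exact ih d k hk

-- a slice upper bound may be clamped to the length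
theorem slice_min_len {α : Type} (xs : List α) (a b : Int) (h0a : 0 ≤ a) (h0b : 0 ≤ b) :
    PySem.List.slice xs (some a) (some b)
      = PySem.List.slice xs (some a) (some (min b (xs.length : Int))) := by
  by_cases h : b ≤ (xs.length : Int)
  · rw [min_eq_left h]
  · rw [min_eq_right (by omega), PySem.List.slice_toNat xs h0a h0b,
        PySem.List.slice_toNat xs h0a (by positivity)]
    rw [List.take_of_length_le (by simp only [List.length_drop]; omega),
        List.take_of_length_le (by simp only [List.length_drop]; omega)]

-- A's index loop over range(a, b) equals B's first-non-blank check on the slice lines[a:b]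
theorem titleLoop_eq_chCheckCore (fw : String) (e : PVEntry) (lines : List String) :
    ∀ (n : Nat) (a b : Int), 0 ≤ a → 0 ≤ b → b ≤ (lines.length : Int) → (b - a).toNat ≤ n →
      titleLoop fw e lines (PySem.List.pyRange a b)
        = (match ((PySem.List.slice lines (some a) (some b)).filterMap
              (fun l => if PySem.Str.strip l ≠ "" then some (PySem.Str.strip l) else none)).head? with
           | some s => if PySem.Str.isIn fw s then [e] else []
           | none => []) := by
  intro n
  induction n with
  | zero =>
    intro a b h0a h0b hbl hn
    have hba : b ≤ a := by omega
    rw [PySem.List.pyRange_one_eq_nil hba, PySem.List.slice_toNat lines h0a h0b]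
    have : b.toNat - a.toNat = 0 := by omega
    rw [this, List.take_zero]
    rfl
  | succ m ih =>
    intro a b h0a h0b hbl hn
    by_cases hba : b ≤ a
    · rw [PySem.List.pyRange_one_eq_nil hba, PySem.List.slice_toNat lines h0a h0b]
      have : b.toNat - a.toNat = 0 := by omega
      rw [this, List.take_zero]
      rfl
    · have hab : a < b := by omega
      have halen : a.toNat < lines.length := by omega
      have hslice : PySem.List.slice lines (some a) (some b)
          = lines[a.toNat] :: PySem.List.slice lines (some (a + 1)) (some b) := by
        rw [PySem.List.slice_toNat lines h0a h0b, PySem.List.slice_toNat lines (by omega) h0b,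
            List.drop_eq_getElem_cons halen]
        have h1 : (a + 1).toNat = a.toNat + 1 := by omega
        have h2 : b.toNat - a.toNat = (b.toNat - (a.toNat + 1)) + 1 := by omega
        rw [h1, h2, List.take_succ_cons]
      rw [PySem.List.pyRange_one_cons hab, hslice]
      simp only [titleLoop, List.filterMap_cons]
      rw [PySem.List.pyGetD_eq_getElem lines "" h0a (by omega)]
      by_cases hsb : PySem.Str.strip lines[a.toNat] = ""
      · simp only [hsb]
        simpa using ih (a + 1) b (by omega) h0b hbl (by omega)
      · simp [hsb]

-- indices produced by firstQ over an enumeration starting at s are ≥ s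
theorem firstQ_enumerate_le (k : String) (q : Int → Bool) :
    ∀ (xs : List String) (s i : Int),
      firstQ k q (PySem.List.enumerate xs s) = some i → s ≤ i := by
  intro xs
  induction xs with
  | nil => intro s i h; simp [PySem.List.enumerate_nil, firstQ] at h
  | cons x rest ih =>
    intro s i h
    rw [PySem.List.enumerate_cons] at h
    by_cases hc : PySem.Str.strip x = k ∧ q s
    · simp [firstQ, hc] at h; omega
    · rw [firstQ, if_neg hc] at h
      have := ih (s + 1) i h
      omega

theorem qual_preface (i : Int) : qual i "Preface" = true := by
  simp [qual]

theorem qual_intro (i : Int) : qual i "Introduction" = decide (80 < i) := by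
  have h2 : patternsB.contains "Introduction" = false := by
    set_option maxHeartbeats 2000000 in decide
  simp [qual, h2]

set_option maxHeartbeats 4000000 in
theorem pat_contains : ∀ ch ∈ CHAPTERS, patternsB.contains (pvPat ch) = true := by
  decide

-- the pre-sort boundary lists of A and of B coincide
theorem boundaries_eq (lines : List String) :
    CHAPTERS.foldl (fun acc ch => acc ++ chLoop ch lines (PySem.List.enumerate lines))
        (prefLoop (PySem.List.enumerate lines) ++ introLoop (PySem.List.enumerate lines))
      = CHAPTERS.foldl (fun acc ch =>
          acc ++ onIdx (((PySem.List.enumerate lines).foldl idxStep PySem.Dict.empty).get? (pvPat ch))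
                   (fun i => chCheck ch lines i))
          (onIdx (((PySem.List.enumerate lines).foldl idxStep PySem.Dict.empty).get? "Preface")
             (fun i => [(i, "preface", none)]) ++
           onIdx (((PySem.List.enumerate lines).foldl idxStep PySem.Dict.empty).get? "Introduction")
             (fun i => [(i, "introduction", none)])) := by
  have hget : ∀ k, ((PySem.List.enumerate lines).foldl idxStep PySem.Dict.empty).get? k
      = firstQ k (fun i => qual i k) (PySem.List.enumerate lines) :=
    fun k => idxFold_get? _ _ k (PySem.Dict.contains_empty k)
  have e1 : (fun i => qual i "Preface") = (fun _ : Int => true) := funext qual_preface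
  have e2 : (fun i => qual i "Introduction") = (fun i : Int => decide (80 < i)) := funext qual_intro
  simp only [hget]
  rw [prefLoop_eq, introLoop_eq, e1, e2]
  refine PySem.List.foldl_congr_mem _ _ _ _ ?_
  intro acc ch hmem
  congr 1
  rw [chLoop_eq]
  have hc : patternsB.contains (pvPat ch) = true := pat_contains ch hmem
  have hfun : (fun i => qual i (pvPat ch)) = (fun _ : Int => true) :=
    funext fun i => by simp [qual, hc]
  rw [hfun]
  cases hfq : firstQ (pvPat ch) (fun _ => true) (PySem.List.enumerate lines) with
  | none => rfl
  | some i =>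
    simp only [onIdx]
    have h0i : (0 : Int) ≤ i := firstQ_enumerate_le _ _ lines 0 i hfq
    show titleLoop (firstWord ch) (i, dget ch "slug", some ch) lines
          (PySem.List.pyRange (i + 1) (min (i + 5) (lines.length : Int))) = chCheck ch lines i
    unfold chCheck
    rw [slice_min_len lines (i + 1) (i + 5) (by omega) (by omega)]
    exact titleLoop_eq_chCheckCore (firstWord ch) _ lines
      ((min (i + 5) (lines.length : Int)) - (i + 1)).toNat (i + 1)
      (min (i + 5) (lines.length : Int)) (by omega)
      (le_min (by omega) (Int.natCast_nonneg _))
      (min_le_right _ _) le_rfl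

-- ===== VERDICT (by name: the statement is the Claim_ definition above) =====
theorem find_chapter_boundaries_spec : Claim_equal_find_chapter_boundaries := by
  intro text _
  unfold Spec_find_chapter_boundaries
  simp only [find_chapter_boundaries, find_chapter_boundaries_alt]
  rw [boundaries_eq (splitLines text)]
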